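-- pv_equiv track=rewrite | github.com/storkme/fucktorio | src/bus/bus_router.py | _trunk_segments
-- ===== SOURCE A (Python) =====
-- def _trunk_segments(start_y: int, end_y: int, skip_ys: set[int]) -> list[tuple[int, int]]:
--     """Split [start_y, end_y] into contiguous segments excluding skip_ys."""
--     segments: list[tuple[int, int]] = []
--     seg_start: int | None = None
--     for y in range(start_y, end_y + 1):
--         if y in skip_ys:
--             if seg_start is not None:
--                 segments.append((seg_start, y - 1))
--                 seg_start = None
--         elif seg_start is None:
--             seg_start = y
--     if seg_start is not None:
--         segments.append((seg_start, end_y))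
--     return segments
-- ===== SOURCE B (Python) =====
-- def _trunk_segments(start_y: int, end_y: int, skip_ys: set[int]) -> list[tuple[int, int]]:
--     """Split [start_y, end_y] into contiguous segments excluding skip_ys.
--
--     Alternative formulation: walk the (sorted) skips that fall inside the
--     range and emit the gap before each one."""
--     segments: list[tuple[int, int]] = []
--     cur = start_y
--     for s in sorted(y for y in skip_ys if start_y <= y <= end_y):
--         if cur <= s - 1:
--             segments.append((cur, s - 1))
--         cur = s + 1
--     if cur <= end_y:
--         segments.append((cur, end_y))
--     return segments
-- ===== Notes on version B (the rewrite author's own statement) =====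
-- stated objective: alternative
-- what changed: Instead of scanning every y in range(start_y, end_y+1) and tracking an open-segment state, B sorts the skip values that fall inside [start_y, end_y] and emits the gap before each skip (and the final tail), so the work depends on the number of in-range skips rather than the width of the range.
import Mathlib
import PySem

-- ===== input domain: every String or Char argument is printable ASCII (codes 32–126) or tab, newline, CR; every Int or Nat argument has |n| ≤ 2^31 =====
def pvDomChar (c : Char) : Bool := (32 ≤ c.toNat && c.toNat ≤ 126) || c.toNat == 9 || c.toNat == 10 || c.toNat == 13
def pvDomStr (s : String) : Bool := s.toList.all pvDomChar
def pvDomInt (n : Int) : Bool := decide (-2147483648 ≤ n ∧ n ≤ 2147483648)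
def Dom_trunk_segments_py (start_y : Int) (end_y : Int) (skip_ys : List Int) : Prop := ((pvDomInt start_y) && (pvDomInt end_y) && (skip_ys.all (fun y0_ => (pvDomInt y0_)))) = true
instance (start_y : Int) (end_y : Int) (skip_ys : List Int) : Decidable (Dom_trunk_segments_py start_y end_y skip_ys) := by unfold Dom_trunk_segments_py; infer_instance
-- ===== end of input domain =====

-- B walks only the sorted in-range skips and emits the gaps between them,
-- instead of A's per-y walk over the whole range (objective: alternative).

-- ===== PORT A =====
-- one loop iteration of A: (segments, seg_start) updated at y
def pvAStep (skip_ys : List Int) (st : List (Int × Int) × Option Int) (y : Int) :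
    List (Int × Int) × Option Int :=
  if skip_ys.contains y then
    match st.2 with
    | some s => (st.1 ++ [(s, y - 1)], none)
    | none => st
  else
    match st.2 with
    | none => (st.1, some y)
    | some _ => st

def trunk_segments_py (start_y : Int) (end_y : Int) (skip_ys : List Int) : List (Int × Int) :=
  let r := (PySem.List.pyRange start_y (end_y + 1) 1).foldl (pvAStep skip_ys) ([], none)
  match r.2 with
  | some s => r.1 ++ [(s, end_y)]
  | none => r.1

-- ===== PORT B =====
-- one loop iteration of B: (segments, cur) updated at skip s
def pvBStep (st : List (Int × Int) × Int) (s : Int) : List (Int × Int) × Int :=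
  ((if st.2 ≤ s - 1 then st.1 ++ [(st.2, s - 1)] else st.1), s + 1)

def trunk_segments_py_alt (start_y : Int) (end_y : Int) (skip_ys : List Int) : List (Int × Int) :=
  let ks := PySem.List.sorted (skip_ys.filter (fun y => start_y ≤ y && y ≤ end_y)) (fun x => x) false
  let r := ks.foldl pvBStep ([], start_y)
  if r.2 ≤ end_y then r.1 ++ [(r.2, end_y)] else r.1

-- ===== PRECONDITION & SPEC =====
def Spec_trunk_segments_py (start_y : Int) (end_y : Int) (skip_ys : List Int) (out : List (Int × Int)) : Prop := out = trunk_segments_py_alt start_y end_y skip_ys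
instance (start_y : Int) (end_y : Int) (skip_ys : List Int) (out : List (Int × Int)) : Decidable (Spec_trunk_segments_py start_y end_y skip_ys out) := by unfold Spec_trunk_segments_py; infer_instance

-- ===== CLAIM (what is proved, stated in full; the proofs are below) =====
def Claim_equal_trunk_segments_py : Prop := ∀ (start_y : Int) (end_y : Int) (skip_ys : List Int), Dom_trunk_segments_py start_y end_y skip_ys → Spec_trunk_segments_py start_y end_y skip_ys (trunk_segments_py start_y end_y skip_ys)

-- ===== LEMMAS AND PROOFS =====

-- appending a prefix of already-emitted segments commutes with A's loop
theorem pvA_shift (skip_ys : List Int) (l : List Int) :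
    ∀ (segs0 segs : List (Int × Int)) (st : Option Int),
    l.foldl (pvAStep skip_ys) (segs0 ++ segs, st)
      = (segs0 ++ (l.foldl (pvAStep skip_ys) (segs, st)).1,
         (l.foldl (pvAStep skip_ys) (segs, st)).2) := by
  induction l with
  | nil => intro segs0 segs st; simp
  | cons y t ih =>
      intro segs0 segs st
      simp only [List.foldl_cons]
      have hstep : pvAStep skip_ys (segs0 ++ segs, st) y
          = (segs0 ++ (pvAStep skip_ys (segs, st) y).1, (pvAStep skip_ys (segs, st) y).2) := by
        unfold pvAStep
        cases st <;> by_cases h : y ∈ skip_ys <;> simp [h]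
      rw [hstep, ih]

-- same for B's loop
theorem pvB_shift (l : List Int) :
    ∀ (segs0 segs : List (Int × Int)) (c : Int),
    l.foldl pvBStep (segs0 ++ segs, c)
      = (segs0 ++ (l.foldl pvBStep (segs, c)).1, (l.foldl pvBStep (segs, c)).2) := by
  induction l with
  | nil => intro segs0 segs c; simp
  | cons s t ih =>
      intro segs0 segs c
      simp only [List.foldl_cons]
      have hstep : pvBStep (segs0 ++ segs, c) s
          = (segs0 ++ (pvBStep (segs, c) s).1, (pvBStep (segs, c) s).2) := by
        unfold pvBStep
        by_cases h : c ≤ s - 1 <;> simp [h]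
      rw [hstep, ih]

-- A's loop over a skip-free range with an open segment keeps the state
theorem pvA_clean_pending (skip_ys : List Int) :
    ∀ (n : Nat) (a : Int) (segs : List (Int × Int)) (s : Int),
    (∀ y : Int, a ≤ y → y < a + n → y ∉ skip_ys) →
    (PySem.List.pyRange a (a + n) 1).foldl (pvAStep skip_ys) (segs, some s) = (segs, some s) := by
  intro n
  induction n with
  | zero => intro a segs s _; simp
  | succ m ih =>
      intro a segs s h
      rw [PySem.List.pyRange_one_cons (by push_cast; omega : a < a + ((m+1 : Nat) : Int))]
      have hc : a ∉ skip_ys := h a le_rfl (by push_cast; omega)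
      simp only [List.foldl_cons]
      have : pvAStep skip_ys (segs, some s) a = (segs, some s) := by
        unfold pvAStep; simp [hc]
      rw [this]
      have := ih (a + 1) segs s (fun y h1 h2 => h y (by omega) (by push_cast at h2 ⊢; omega))
      have heq : a + 1 + (m : Int) = a + ((m+1 : Nat) : Int) := by push_cast; omega
      rw [heq] at this
      exact this

-- A's loop over a skip-free range starting with no open segment
theorem pvA_clean (skip_ys : List Int) (a c : Int) (hac : a ≤ c)
    (h : ∀ y : Int, a ≤ y → y < c → y ∉ skip_ys) :
    (PySem.List.pyRange a c 1).foldl (pvAStep skip_ys) ([], none)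
      = ([], if a < c then some a else none) := by
  by_cases hlt : a < c
  · rw [PySem.List.pyRange_one_cons hlt]
    simp only [List.foldl_cons]
    have hc : a ∉ skip_ys := h a le_rfl hlt
    have hstep : pvAStep skip_ys (([] : List (Int × Int)), none) a = ([], some a) := by
      unfold pvAStep; simp [hc]
    rw [hstep]
    have hn : c = (a + 1) + ((c - (a+1)).toNat : Int) := by omega
    rw [hn]
    rw [pvA_clean_pending skip_ys ((c - (a+1)).toNat) (a+1) [] a
      (fun y h1 h2 => h y (by omega) (by omega))]
    simp [hlt]
  · have : c = a := by omega
    subst this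
    simp [PySem.List.pyRange_one_eq_nil le_rfl]

-- main induction: A's full-range walk equals B's walk over any sorted list ks
-- that contains exactly the skips in [a, b] (elements ≥ a - 1 are tolerated,
-- which is what the recursive call after a skip produces on duplicates)
theorem pv_main (skip_ys : List Int) (b : Int) :
    ∀ (ks : List Int) (a : Int),
    ks.Pairwise (· ≤ ·) →
    (∀ y : Int, a ≤ y → y ≤ b → (y ∈ skip_ys ↔ y ∈ ks)) →
    (∀ y ∈ ks, a - 1 ≤ y ∧ y ≤ b) →
    (match (PySem.List.pyRange a (b + 1) 1).foldl (pvAStep skip_ys) ([], none) with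
     | (segs, some s) => segs ++ [(s, b)]
     | (segs, none) => segs)
    = (let r := ks.foldl pvBStep ([], a)
       if r.2 ≤ b then r.1 ++ [(r.2, b)] else r.1) := by
  intro ks
  induction ks with
  | nil =>
      intro a _ h2 _
      by_cases hab : a ≤ b
      · rw [pvA_clean skip_ys a (b+1) (by omega)
          (fun y h1 hy => by
            by_contra hc
            have := (h2 y h1 (by omega)).mp hc
            simp at this)]
        simp [hab, show a < b + 1 by omega]
      · rw [PySem.List.pyRange_one_eq_nil (by omega : b + 1 ≤ a)]
        simp [hab]
  | cons k t ih =>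
      intro a hp h2 h3
      have hkb : k ≤ b := (h3 k (List.mem_cons_self)).2
      have hka : a - 1 ≤ k := (h3 k (List.mem_cons_self)).1
      have htmin : ∀ y ∈ t, k ≤ y := fun y hy => (List.pairwise_cons.mp hp).1 y hy
      by_cases hak : a ≤ k
      · -- k is a genuine skip in [a, b]
        have hck : k ∈ skip_ys :=
          (h2 k hak hkb).mpr List.mem_cons_self
        -- split A's range at k
        rw [PySem.List.pyRange_one_append a k (b+1) hak (by omega)]
        rw [List.foldl_append]
        rw [pvA_clean skip_ys a k hak
          (fun y h1 hy => by
            by_contra hc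
            have hmem := (h2 y h1 (by omega)).mp hc
            rcases List.mem_cons.mp hmem with rfl | hmt
            · omega
            · have := htmin y hmt; omega)]
        rw [PySem.List.pyRange_one_cons (by omega : k < b + 1)]
        simp only [List.foldl_cons]
        -- the step at k
        have hsegs0 : pvAStep skip_ys ([], if a < k then some a else none) k
            = ((if a < k then [(a, k-1)] else []), none) := by
          unfold pvAStep
          by_cases h : a < k <;> simp [h, hck]
        rw [hsegs0]
        -- shift out the emitted prefix on both sides
        set segs0 : List (Int × Int) := if a < k then [(a, k-1)] else [] with hs0
        have hA := pvA_shift skip_ys (PySem.List.pyRange (k+1) (b+1) 1) segs0 [] none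
        simp only [List.append_nil] at hA
        rw [hA]
        -- B side: first step then shift
        have hb1 : pvBStep ([], a) k = (segs0, k + 1) := by
          unfold pvBStep
          by_cases h : a < k
          · simp [hs0, h, show a ≤ k - 1 by omega]
          · simp [hs0, h]
        rw [hb1]
        have hB := pvB_shift t segs0 [] (k+1)
        simp only [List.append_nil] at hB
        rw [hB]
        -- apply IH at a := k + 1
        have hind := ih (k+1) (List.pairwise_cons.mp hp).2
          (fun y h1 hy => by
            constructor
            · intro hc
              have hmem := (h2 y (by omega) hy).mp hc
              rcases List.mem_cons.mp hmem with rfl | hmt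
              · omega
              · exact hmt
            · intro hmt
              exact (h2 y (by omega) hy).mpr (List.mem_cons_of_mem _ hmt))
          (fun y hy => ⟨by have := htmin y hy; omega, (h3 y (List.mem_cons_of_mem _ hy)).2⟩)
        rcases hfa : (PySem.List.pyRange (k+1) (b+1) 1).foldl (pvAStep skip_ys) ([], none) with ⟨segsA, stA⟩
        rw [hfa] at hind
        cases stA with
        | none =>
            simp only at hind
            by_cases hrb : (t.foldl pvBStep ([], k+1)).2 ≤ b <;>
              simp [hrb, hind, List.append_assoc]
        | some s =>
            simp only at hind
            by_cases hrb : (t.foldl pvBStep ([], k+1)).2 ≤ b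
            · simp only [hrb, if_true, List.append_assoc] at hind ⊢
              simp [hind]
            · simp only [hrb, if_false, List.append_assoc] at hind ⊢
              simp [hind]
      · -- k = a - 1: a duplicate of the previous skip; B's step is a no-op
        have hk : k = a - 1 := by omega
        simp only [List.foldl_cons]
        have hb1 : pvBStep ([], a) k = ([], a) := by
          unfold pvBStep; simp [hk]
        rw [hb1]
        exact ih a (List.pairwise_cons.mp hp).2
          (fun y h1 hy => by
            constructor
            · intro hc
              rcases List.mem_cons.mp ((h2 y h1 hy).mp hc) with rfl | hmt
              · omega
              · exact hmt
            · intro hmt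
              exact (h2 y h1 hy).mpr (List.mem_cons_of_mem _ hmt))
          (fun y hy => h3 y (List.mem_cons_of_mem _ hy))

-- ===== VERDICT (by name: the statement is the Claim_ definition above) =====
theorem trunk_segments_py_spec : Claim_equal_trunk_segments_py := by
  intro start_y end_y skip_ys _
  unfold Spec_trunk_segments_py trunk_segments_py trunk_segments_py_alt
  set ks := PySem.List.sorted (skip_ys.filter (fun y => start_y ≤ y && y ≤ end_y)) (fun x => x) false with hks
  have hpair : ks.Pairwise (· ≤ ·) := PySem.List.sorted_pairwise _ _
  have hmem : ∀ y : Int, y ∈ ks ↔ (y ∈ skip_ys ∧ start_y ≤ y ∧ y ≤ end_y) := by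
    intro y
    rw [hks, PySem.List.mem_sorted, List.mem_filter]
    simp
  have := pv_main skip_ys end_y ks start_y hpair
    (fun y h1 hy => by
      rw [hmem]
      simp [h1, hy])
    (fun y hy => by
      have := (hmem y).mp hy
      exact ⟨by omega, this.2.2⟩)
  rcases hfa : (PySem.List.pyRange start_y (end_y + 1) 1).foldl (pvAStep skip_ys) ([], none) with ⟨segsA, stA⟩
  rw [hfa] at this
  cases stA <;> simpa using this
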